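-- pv_equiv track=rewrite | github.com/liyown/mycode | python/cdc_in_dnn_code_mnist/new_function.py | Shift_Choose
-- ===== SOURCE A (Python) =====
-- def Shift_Choose(CodePackageShift, index):
--
--     shift_index = list()
--     shift_len = len(CodePackageShift)
--
--
--     for i in range(shift_len):
--         for j in range(shift_len):
--             shift_index.append([i,j])
--
--     D = CodePackageShift[shift_index[index][0]]
--     R = CodePackageShift[shift_index[index][1]]
--
--     return [D, R]
-- ===== SOURCE B (Python) =====
-- def Shift_Choose(CodePackageShift, index):
--     n = len(CodePackageShift)
--     k = index + n * n if index < 0 else index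
--     if not 0 <= k < n * n:
--         raise IndexError("list index out of range")
--     return [CodePackageShift[k // n], CodePackageShift[k % n]]
-- ===== Notes on version B (the rewrite author's own statement) =====
-- stated objective: faster
-- what changed: B replaces the materialised n*n list of index pairs with direct arithmetic (normalise the index, then divmod by n), so no list is built at all.
import Mathlib
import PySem

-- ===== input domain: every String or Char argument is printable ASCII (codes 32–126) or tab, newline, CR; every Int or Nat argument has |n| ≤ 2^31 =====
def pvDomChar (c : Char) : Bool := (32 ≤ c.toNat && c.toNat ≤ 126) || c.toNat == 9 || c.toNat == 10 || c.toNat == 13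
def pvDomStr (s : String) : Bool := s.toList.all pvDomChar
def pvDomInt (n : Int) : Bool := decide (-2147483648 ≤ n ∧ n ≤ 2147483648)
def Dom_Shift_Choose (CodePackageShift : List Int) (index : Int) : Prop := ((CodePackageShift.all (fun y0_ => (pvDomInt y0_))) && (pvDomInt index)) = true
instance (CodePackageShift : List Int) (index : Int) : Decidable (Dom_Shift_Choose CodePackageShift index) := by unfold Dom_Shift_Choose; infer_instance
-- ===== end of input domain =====

-- B replaces A's materialised n*n list of index pairs with direct index arithmetic
-- (normalise, then divmod by n); equivalence of the RETURN value on all inputs where A returns.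

-- ===== PORT A =====
def Shift_Choose (CodePackageShift : List Int) (index : Int) : List Int :=
  let shift_len : Int := CodePackageShift.length
  let shift_index : List (List Int) :=
    (PySem.List.pyRange 0 shift_len 1).foldl (fun acc i =>
      (PySem.List.pyRange 0 shift_len 1).foldl (fun acc2 j => acc2 ++ [[i, j]]) acc) []
  match PySem.List.pyGet? shift_index index with
  | none => []        -- IndexError: excluded by Pre_
  | some pair =>
    match PySem.List.pyGet? pair 0, PySem.List.pyGet? pair 1 with
    | some i0, some j0 =>
      match PySem.List.pyGet? CodePackageShift i0, PySem.List.pyGet? CodePackageShift j0 with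
      | some D, some R => [D, R]
      | _, _ => []    -- unreachable under Pre_
    | _, _ => []      -- unreachable: pairs have length 2

def Shift_Choose_alt (CodePackageShift : List Int) (index : Int) : List Int :=
  let n : Int := CodePackageShift.length
  let k : Int := if index < 0 then index + n * n else index
  if 0 ≤ k ∧ k < n * n then
    -- [cps[k // n], cps[k % n]]; the indices lie in [0, n) so the lookups succeed
    ((PySem.List.pyGet? CodePackageShift (PySem.Int.floordiv k n)).bind (fun D =>
      (PySem.List.pyGet? CodePackageShift (PySem.Int.mod k n)).map (fun R => [D, R]))).getD []
  else []             -- IndexError: excluded by Pre_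

-- ===== PRECONDITION & SPEC =====
-- Pre_ excludes exactly the inputs on which A raises IndexError: index outside
-- [-n*n, n*n) for n = len(CodePackageShift) (B raises the same IndexError there).
def Pre_Shift_Choose (CodePackageShift : List Int) (index : Int) : Prop :=
  -((CodePackageShift.length : Int) * CodePackageShift.length) ≤ index ∧
  index < (CodePackageShift.length : Int) * CodePackageShift.length
instance (CodePackageShift : List Int) (index : Int) : Decidable (Pre_Shift_Choose CodePackageShift index) := by unfold Pre_Shift_Choose; infer_instance
def pvWitness_Shift_Choose : List Int × Int := ([3, 7, 9], -4)

def Spec_Shift_Choose (CodePackageShift : List Int) (index : Int) (out : List Int) : Prop := out = Shift_Choose_alt CodePackageShift index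
instance (CodePackageShift : List Int) (index : Int) (out : List Int) : Decidable (Spec_Shift_Choose CodePackageShift index out) := by unfold Spec_Shift_Choose; infer_instance

-- ===== CLAIM (what is proved, stated in full; the proofs are below) =====
def Claim_equal_Shift_Choose : Prop := ∀ (CodePackageShift : List Int) (index : Int), Dom_Shift_Choose CodePackageShift index → Pre_Shift_Choose CodePackageShift index → Spec_Shift_Choose CodePackageShift index (Shift_Choose CodePackageShift index)

-- ===== LEMMAS AND PROOFS =====

-- A's double loop builds exactly the list of pairs [k/n, k%n] for k = 0..m*n-1.
lemma pairTable_eq (n : Nat) : ∀ (m : Nat),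
    (List.range m).flatMap (fun (i : Nat) => (List.range n).map (fun (j : Nat) => ([(i : Int), (j : Int)] : List Int)))
      = (List.range (m * n)).map (fun (k : Nat) => ([((k / n : Nat) : Int), ((k % n : Nat) : Int)] : List Int)) := by
  intro m
  induction m with
  | zero => simp
  | succ m ih =>
    rw [List.range_succ, List.flatMap_append, ih, Nat.succ_mul, List.range_add,
        List.map_append]
    congr 1
    · simp only [List.flatMap_cons, List.flatMap_nil, List.append_nil, List.map_map]
      apply List.map_congr_left
      intro j hj
      have hjn : j < n := List.mem_range.mp hj
      have hn : 0 < n := by omega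
      have hdiv : (m * n + j) / n = m := by
        rw [Nat.mul_comm m n, Nat.mul_add_div hn]
        simp [Nat.div_eq_of_lt hjn]
      have hmod : (m * n + j) % n = j := by
        rw [Nat.mul_comm m n, Nat.mul_add_mod]
        exact Nat.mod_eq_of_lt hjn
      simp [Function.comp, hdiv, hmod]

-- the shift_index list A builds, named
lemma shift_index_eq (xs : List Int) :
    (PySem.List.pyRange 0 (xs.length : Int) 1).foldl (fun acc i =>
        (PySem.List.pyRange 0 (xs.length : Int) 1).foldl (fun acc2 j => acc2 ++ [[i, j]]) acc) []
      = (List.range (xs.length * xs.length)).map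
          (fun k => ([((k / xs.length : Nat) : Int), ((k % xs.length : Nat) : Int)] : List Int)) := by
  have hinner : ∀ (i : Int) (acc : List (List Int)),
      (PySem.List.pyRange 0 (xs.length : Int) 1).foldl (fun acc2 j => acc2 ++ [[i, j]]) acc
        = acc ++ (PySem.List.pyRange 0 (xs.length : Int) 1).map (fun j => [i, j]) := by
    intro i acc
    exact PySem.List.foldl_append_singleton_eq_map (fun j => [i, j]) _ acc
  calc (PySem.List.pyRange 0 (xs.length : Int) 1).foldl (fun acc i =>
          (PySem.List.pyRange 0 (xs.length : Int) 1).foldl (fun acc2 j => acc2 ++ [[i, j]]) acc) []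
      = (PySem.List.pyRange 0 (xs.length : Int) 1).foldl (fun acc i =>
          acc ++ (PySem.List.pyRange 0 (xs.length : Int) 1).map (fun j => [i, j])) [] := by
        apply PySem.List.foldl_congr_mem
        intro acc i _
        exact hinner i acc
    _ = (PySem.List.pyRange 0 (xs.length : Int) 1).flatMap
          (fun i => (PySem.List.pyRange 0 (xs.length : Int) 1).map (fun j => [i, j])) := by
        rw [PySem.List.foldl_append_eq_flatMap]; rfl
    _ = (List.range (xs.length * xs.length)).map
          (fun k => ([((k / xs.length : Nat) : Int), ((k % xs.length : Nat) : Int)] : List Int)) := by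
        rw [PySem.List.pyRange_zero_nat, List.flatMap_map]
        simpa using pairTable_eq xs.length xs.length

-- both ports at a normalised nonnegative position
lemma main_agree (xs : List Int) (index : Int) (hpre : Pre_Shift_Choose xs index) :
    Shift_Choose xs index = Shift_Choose_alt xs index := by
  obtain ⟨h1, h2⟩ := hpre
  set n : Nat := xs.length with hn
  have hnpos : 0 < n := by
    by_contra h
    have : n = 0 := by omega
    rw [this] at h1 h2; push_cast at h1 h2; omega
  -- normalised index
  set k : Int := if index < 0 then index + (n : Int) * n else index with hk
  have hk0 : 0 ≤ k := by
    rw [hk]; split_ifs with h <;> omega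
  have hklt : k < (n : Int) * n := by
    rw [hk]; split_ifs with h <;> omega
  set kn : Nat := k.toNat with hkn
  have hknlt : kn < n * n := by
    have : (kn : Int) = k := Int.toNat_of_nonneg hk0
    have := hklt
    omega
  have hdivlt : kn / n < n := Nat.div_lt_iff_lt_mul hnpos |>.mpr hknlt
  have hmodlt : kn % n < n := Nat.mod_lt _ hnpos
  -- A side
  have hA : Shift_Choose xs index = [xs[kn / n]'hdivlt, xs[kn % n]'hmodlt] := by
    show (match PySem.List.pyGet? ((PySem.List.pyRange 0 (xs.length : Int) 1).foldl (fun acc i =>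
        (PySem.List.pyRange 0 (xs.length : Int) 1).foldl (fun acc2 j => acc2 ++ [[i, j]]) acc) []) index with
      | none => []
      | some pair =>
        match PySem.List.pyGet? pair 0, PySem.List.pyGet? pair 1 with
        | some i0, some j0 =>
          match PySem.List.pyGet? xs i0, PySem.List.pyGet? xs j0 with
          | some D, some R => [D, R]
          | _, _ => []
        | _, _ => []) = _
    rw [shift_index_eq xs]
    have hlen : ((List.range (n * n)).map
        (fun k => ([((k / n : Nat) : Int), ((k % n : Nat) : Int)] : List Int))).length = n * n := by
      simp
    have hget : PySem.List.pyGet? ((List.range (n * n)).map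
        (fun k => ([((k / n : Nat) : Int), ((k % n : Nat) : Int)] : List Int))) index
        = some [((kn / n : Nat) : Int), ((kn % n : Nat) : Int)] := by
      by_cases hneg : index < 0
      · have hkneq : kn = n * n - (-index).toNat := by
          have : k = index + (n : Int) * n := by rw [hk]; simp [hneg]
          omega
        have := PySem.List.pyGet?_neg_natCast ((List.range (n * n)).map
            (fun k => ([((k / n : Nat) : Int), ((k % n : Nat) : Int)] : List Int))) (-index).toNat
            (by omega) (by rw [hlen]; omega)
        rw [show index = -(((-index).toNat : Nat) : Int) by omega, this, hlen, ← hkneq]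
        rw [List.getElem?_map, List.getElem?_range hknlt]
        rfl
      · have hkeq : k = index := by rw [hk]; simp [hneg]
        rw [PySem.List.pyGet?_of_nonneg _ (by omega)]
        have : index.toNat = kn := by omega
        rw [this, List.getElem?_map, List.getElem?_range hknlt]
        rfl
    rw [hget]
    show (match PySem.List.pyGet? ([((kn / n : Nat) : Int), ((kn % n : Nat) : Int)] : List Int) 0,
          PySem.List.pyGet? ([((kn / n : Nat) : Int), ((kn % n : Nat) : Int)] : List Int) 1 with
      | some i0, some j0 =>
        match PySem.List.pyGet? xs i0, PySem.List.pyGet? xs j0 with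
        | some D, some R => [D, R]
        | _, _ => []
      | _, _ => ([] : List Int)) = _
    have h0 : PySem.List.pyGet? ([((kn / n : Nat) : Int), ((kn % n : Nat) : Int)] : List Int) 0
        = some ((kn / n : Nat) : Int) := rfl
    have h1' : PySem.List.pyGet? ([((kn / n : Nat) : Int), ((kn % n : Nat) : Int)] : List Int) 1
        = some ((kn % n : Nat) : Int) := rfl
    rw [h0, h1']
    show (match PySem.List.pyGet? xs ((kn / n : Nat) : Int), PySem.List.pyGet? xs ((kn % n : Nat) : Int) with
      | some D, some R => [D, R]
      | _, _ => ([] : List Int)) = _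
    rw [PySem.List.pyGet?_natCast, PySem.List.pyGet?_natCast,
        List.getElem?_eq_getElem (by omega), List.getElem?_eq_getElem (by omega)]
  -- B side
  have hB : Shift_Choose_alt xs index = [xs[kn / n]'hdivlt, xs[kn % n]'hmodlt] := by
    show (if 0 ≤ k ∧ k < (n : Int) * n then
      ((PySem.List.pyGet? xs (PySem.Int.floordiv k (n : Int))).bind (fun D =>
        (PySem.List.pyGet? xs (PySem.Int.mod k (n : Int))).map (fun R => [D, R]))).getD []
      else []) = _
    rw [if_pos ⟨hk0, hklt⟩]
    have hkc : k = ((kn : Nat) : Int) := by omega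
    rw [hkc, PySem.Int.floordiv_natCast, PySem.Int.mod_natCast,
        PySem.List.pyGet?_natCast, PySem.List.pyGet?_natCast,
        List.getElem?_eq_getElem (by omega), List.getElem?_eq_getElem (by omega)]
    rfl
  rw [hA, hB]

-- ===== VERDICT (by name: the statement is the Claim_ definition above) =====
theorem Shift_Choose_spec : Claim_equal_Shift_Choose := by
  intro xs index _ hpre
  unfold Spec_Shift_Choose
  exact main_agree xs index hpre
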